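-- pv_equiv track=rewrite | github.com/thaarmann3/multi_modal | old/voice/test_voice_control.py | parse_single_command
-- ===== SOURCE A (Python) =====
-- from typing import Optional, Tuple, List
--
-- def parse_single_command(text: str) -> Tuple[Optional[str], bool]:
--     """
--     Parse a single voice command and return action message and shutdown flag.
--
--     Args:
--         text: Single command text
--
--     Returns:
--         Tuple of (action message string or None, shutdown flag)
--     """
--     text_lower = text.lower()
--
--     # Shutdown commands
--     if any(word in text_lower for word in ["stop", "freeze", "kill"]):
--         return "Shutting down", True
--
--     # Movement commands
--     if any(word in text_lower for word in ["move", "go"]) and "left" in text_lower: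
--         return "Moving left", False
--     elif any(word in text_lower for word in ["move", "go"]) and "right" in text_lower:
--         return "Moving right", False
--     elif any(word in text_lower for word in ["move", "go"]) and ("forward" in text_lower or "ahead" in text_lower):
--         return "Moving forward", False
--     elif any(word in text_lower for word in ["move", "go"]) and ("back" in text_lower or "backward" in text_lower):
--         return "Moving backward", False
--     elif any(word in text_lower for word in ["move", "go"]) and "up" in text_lower:
--         return "Moving up", False
--     elif any(word in text_lower for word in ["move", "go"]) and "down" in text_lower:
--         return "Moving down", False
--
--     # No recognized command
--     return None, False
-- ===== SOURCE B (Python) =====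
-- _KEYWORDS = ["stop", "freeze", "kill", "move", "go", "left", "right",
--              "forward", "ahead", "back", "backward", "up", "down"]
--
-- def parse_single_command(text):
--     """Single left-to-right scan collecting every keyword that occurs as a
--     substring into a set, then one decision on that flag set (no per-branch
--     substring searches)."""
--     tl = text.lower()
--     found = set()
--     for i in range(len(tl)):
--         for k in _KEYWORDS:
--             if tl.startswith(k, i):
--                 found.add(k)
--     if found & {"stop", "freeze", "kill"}:
--         return "Shutting down", True
--     if found & {"move", "go"}:
--         if "left" in found:
--             return "Moving left", False
--         if "right" in found:
--             return "Moving right", False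
--         if "forward" in found or "ahead" in found:
--             return "Moving forward", False
--         if "back" in found or "backward" in found:
--             return "Moving backward", False
--         if "up" in found:
--             return "Moving up", False
--         if "down" in found:
--             return "Moving down", False
--     return None, False
-- ===== Notes on version B (the rewrite author's own statement) =====
-- stated objective: alternative
-- what changed: B replaces A's thirteen independent substring searches spread over an elif chain by one left-to-right scan of the text that collects every occurring keyword into a set, and then decides purely on that flag set.
import Mathlib
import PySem

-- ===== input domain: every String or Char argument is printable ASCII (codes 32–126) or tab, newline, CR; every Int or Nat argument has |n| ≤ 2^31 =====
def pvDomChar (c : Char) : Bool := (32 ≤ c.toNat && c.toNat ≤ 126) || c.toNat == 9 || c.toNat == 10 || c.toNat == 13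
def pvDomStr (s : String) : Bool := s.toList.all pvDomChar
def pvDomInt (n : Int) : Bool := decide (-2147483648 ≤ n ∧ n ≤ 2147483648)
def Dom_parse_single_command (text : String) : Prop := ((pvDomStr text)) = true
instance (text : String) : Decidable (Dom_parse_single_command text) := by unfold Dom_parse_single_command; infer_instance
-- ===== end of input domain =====

-- B replaces A's thirteen independent substring searches by ONE left-to-right scan collecting
-- the keywords that occur into a set, then a decision on that flag set (objective: alternative).

-- ===== PORT A =====
def parse_single_command (text : String) : Option String × Bool :=
  let tl := PySem.Str.lower text
  if ["stop", "freeze", "kill"].any (fun w => PySem.Str.isIn w tl) then (some "Shutting down", true)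
  else if ["move", "go"].any (fun w => PySem.Str.isIn w tl) && PySem.Str.isIn "left" tl then (some "Moving left", false)
  else if ["move", "go"].any (fun w => PySem.Str.isIn w tl) && PySem.Str.isIn "right" tl then (some "Moving right", false)
  else if ["move", "go"].any (fun w => PySem.Str.isIn w tl) && (PySem.Str.isIn "forward" tl || PySem.Str.isIn "ahead" tl) then (some "Moving forward", false)
  else if ["move", "go"].any (fun w => PySem.Str.isIn w tl) && (PySem.Str.isIn "back" tl || PySem.Str.isIn "backward" tl) then (some "Moving backward", false)
  else if ["move", "go"].any (fun w => PySem.Str.isIn w tl) && PySem.Str.isIn "up" tl then (some "Moving up", false)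
  else if ["move", "go"].any (fun w => PySem.Str.isIn w tl) && PySem.Str.isIn "down" tl then (some "Moving down", false)
  else (none, false)

-- ===== PORT B =====
-- the _KEYWORDS table of Source B, over code points
def pvKeywords : List (List Char) :=
  ["stop".toList, "freeze".toList, "kill".toList, "move".toList, "go".toList,
   "left".toList, "right".toList, "forward".toList, "ahead".toList,
   "back".toList, "backward".toList, "up".toList, "down".toList]

-- the nested 'for i in range(len(tl)): for k in _KEYWORDS: if tl.startswith(k, i): found.add(k)'
-- (Python's tl.startswith(k, i) with 0 ≤ i is exactly 'k is a prefix of tl[i:]': Chars.startswith (tl.drop i) k)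
def pvScan (tl : List Char) : PySem.Set (List Char) :=
  (List.range tl.length).foldl
    (fun acc i =>
      pvKeywords.foldl
        (fun acc k => if PySem.Chars.startswith (tl.drop i) k then PySem.Set.add acc k else acc)
        acc)
    PySem.Set.empty

def parse_single_command_alt (text : String) : Option String × Bool :=
  let tl := (PySem.Str.lower text).toList
  let found := pvScan tl
  -- 'found & {…}' is truthy iff some member of the literal set is in found (order-independent)
  if ["stop".toList, "freeze".toList, "kill".toList].any (fun k => PySem.Set.contains found k) then
    (some "Shutting down", true)
  else if ["move".toList, "go".toList].any (fun k => PySem.Set.contains found k) then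
    if PySem.Set.contains found "left".toList then (some "Moving left", false)
    else if PySem.Set.contains found "right".toList then (some "Moving right", false)
    else if PySem.Set.contains found "forward".toList || PySem.Set.contains found "ahead".toList then (some "Moving forward", false)
    else if PySem.Set.contains found "back".toList || PySem.Set.contains found "backward".toList then (some "Moving backward", false)
    else if PySem.Set.contains found "up".toList then (some "Moving up", false)
    else if PySem.Set.contains found "down".toList then (some "Moving down", false)
    else (none, false)
  else (none, false)

-- ===== PRECONDITION & SPEC =====
def Spec_parse_single_command (text : String) (out : Option String × Bool) : Prop := out = parse_single_command_alt text
instance (text : String) (out : Option String × Bool) : Decidable (Spec_parse_single_command text out) := by unfold Spec_parse_single_command; infer_instance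

-- ===== CLAIM (what is proved, stated in full; the proofs are below) =====
def Claim_equal_parse_single_command : Prop := ∀ (text : String), Dom_parse_single_command text → Spec_parse_single_command text (parse_single_command text)

-- ===== LEMMAS AND PROOFS =====

-- membership in the inner conditional-add fold
theorem pv_mem_inner (ks : List (List Char)) (p : List Char → Bool) (acc : PySem.Set (List Char)) (x : List Char) :
    x ∈ ks.foldl (fun a k => if p k then PySem.Set.add a k else a) acc ↔ x ∈ acc ∨ (x ∈ ks ∧ p x = true) := by
  induction ks generalizing acc with
  | nil => simp
  | cons k ks ih =>
    simp only [List.foldl_cons, ih, List.mem_cons]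
    by_cases hp : p k = true
    · simp [hp, PySem.Set.mem_add]
      constructor
      · rintro ((h | rfl) | ⟨h, hpx⟩)
        · exact Or.inl h
        · exact Or.inr ⟨Or.inl rfl, hp⟩
        · exact Or.inr ⟨Or.inr h, hpx⟩
      · rintro (h | ⟨(rfl | h), hpx⟩)
        · exact Or.inl (Or.inl h)
        · exact Or.inl (Or.inr rfl)
        · exact Or.inr ⟨h, hpx⟩
    · simp only [hp]
      constructor
      · rintro (h | ⟨h, hpx⟩)
        · exact Or.inl h
        · exact Or.inr ⟨Or.inr h, hpx⟩
      · rintro (h | ⟨(rfl | h), hpx⟩)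
        · exact Or.inl h
        · exact absurd hpx hp
        · exact Or.inr ⟨h, hpx⟩

-- membership in the whole scan
theorem pv_mem_scan (tl : List Char) (x : List Char) :
    x ∈ pvScan tl ↔ x ∈ pvKeywords ∧ ∃ i < tl.length, x <+: tl.drop i := by
  unfold pvScan
  have main : ∀ (is : List Nat) (acc : PySem.Set (List Char)),
      x ∈ is.foldl (fun acc i => pvKeywords.foldl
            (fun acc k => if PySem.Chars.startswith (tl.drop i) k then PySem.Set.add acc k else acc) acc) acc
        ↔ x ∈ acc ∨ (x ∈ pvKeywords ∧ ∃ i ∈ is, x <+: tl.drop i) := by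
    intro is
    induction is with
    | nil => simp
    | cons i is ih =>
      intro acc
      rw [List.foldl_cons, ih,
        pv_mem_inner pvKeywords (fun k => PySem.Chars.startswith (tl.drop i) k)]
      simp only [PySem.Chars.startswith_iff, List.mem_cons]
      constructor
      · rintro ((h | ⟨hk, hp⟩) | ⟨hk, j, hj, hp⟩)
        · exact Or.inl h
        · exact Or.inr ⟨hk, i, Or.inl rfl, hp⟩
        · exact Or.inr ⟨hk, j, Or.inr hj, hp⟩
      · rintro (h | ⟨hk, j, (rfl | hj), hp⟩)
        · exact Or.inl (Or.inl h)
        · exact Or.inl (Or.inr ⟨hk, hp⟩)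
        · exact Or.inr ⟨hk, j, hj, hp⟩
  rw [main]
  simp [PySem.Set.empty, List.mem_range]

-- for a nonempty keyword of the table, scan membership is exactly Python's 'k in tl'
theorem pv_contains_scan (tl : List Char) (k : List Char) (hk : k ∈ pvKeywords) (hne : k ≠ []) :
    PySem.Set.contains (pvScan tl) k = PySem.Chars.isIn k tl := by
  rw [Bool.eq_iff_iff, PySem.Set.contains_iff, pv_mem_scan, ← PySem.Chars.exists_prefix_drop_iff_isIn]
  constructor
  · rintro ⟨_, i, _, hp⟩; exact ⟨i, hp⟩
  · rintro ⟨i, hp⟩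
    refine ⟨hk, ?_⟩
    by_cases hi : i < tl.length
    · exact ⟨i, hi, hp⟩
    · exfalso
      have : tl.drop i = [] := List.drop_eq_nil_of_le (by omega)
      rw [this] at hp
      exact hne (List.prefix_nil.mp hp)

-- ===== VERDICT (by name: the statement is the Claim_ definition above) =====
theorem parse_single_command_spec : Claim_equal_parse_single_command := by
  intro text _
  unfold Spec_parse_single_command parse_single_command parse_single_command_alt
  have hc : ∀ k : List Char, k ∈ pvKeywords → k ≠ [] →
      PySem.Set.contains (pvScan (PySem.Str.lower text).toList) k
        = PySem.Chars.isIn k (PySem.Str.lower text).toList := fun k hk hne =>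
    pv_contains_scan _ k hk hne
  simp only [List.any_cons, List.any_nil, Bool.or_false,
    hc "stop".toList (by decide) (by decide), hc "freeze".toList (by decide) (by decide),
    hc "kill".toList (by decide) (by decide), hc "move".toList (by decide) (by decide),
    hc "go".toList (by decide) (by decide), hc "left".toList (by decide) (by decide),
    hc "right".toList (by decide) (by decide), hc "forward".toList (by decide) (by decide),
    hc "ahead".toList (by decide) (by decide), hc "back".toList (by decide) (by decide),
    hc "backward".toList (by decide) (by decide), hc "up".toList (by decide) (by decide),
    hc "down".toList (by decide) (by decide), PySem.Str.isIn]
  cases hm : (PySem.Chars.isIn "move".toList (PySem.Str.lower text).toList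
      || PySem.Chars.isIn "go".toList (PySem.Str.lower text).toList) <;>
    simp
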